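-- pv_equiv track=rewrite | github.com/holubecmichal/reading-order | spatial/spatial_data.py | find_transitivity
-- ===== SOURCE A (Python) =====
-- def find_transitivity(candidates: [tuple]):
--     """
--     Pomocna funkce pro overeni tranzitivity
--     """
--
--     for i, source in enumerate(candidates):
--         for j, candidate in enumerate(candidates):
--             if i == j:
--                 continue
--
--             if source[-1] == candidate[0]:
--                 return i, j
--
--     return None
-- ===== SOURCE B (Python) =====
-- def find_transitivity(candidates: [tuple]):
--     """
--     Pomocna funkce pro overeni tranzitivity
--     """
--
--     # one pass: for every first-element value remember its first two indices
--     # (empty candidates have no first element and cannot participate: skip them)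
--     firsts = {}
--     for j, cand in enumerate(candidates):
--         if not cand:
--             continue
--         v = cand[0]
--         if v not in firsts:
--             firsts[v] = (j, None)
--         elif firsts[v][1] is None:
--             firsts[v] = (firsts[v][0], j)
--     # one pass: first i whose last element starts some other candidate
--     for i, source in enumerate(candidates):
--         if not source:
--             continue
--         pair = firsts.get(source[-1])
--         if pair is None:
--             continue
--         a, b = pair
--         if a != i:
--             return i, a
--         if b is not None:
--             return i, b
--     return None
-- ===== Notes on version B (the rewrite author's own statement) =====
-- stated objective: alternative
-- what changed: Replaces the nested inner rescan with one dict-building pass (recording the first two indices per first element, skipping empty candidates) plus one lookup pass; worst case drops from O(n^2) to O(n), though on random inputs A's early exit makes the measured times comparable.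
-- outside the precondition, e.g. on find_transitivity([()]): A returns None, B returns None; on find_transitivity([(1, 2), (2,), ()]): A returns (0, 1), B returns (0, 1); on find_transitivity([(), (1,)]): A raises IndexError, B returns None
import Mathlib
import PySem

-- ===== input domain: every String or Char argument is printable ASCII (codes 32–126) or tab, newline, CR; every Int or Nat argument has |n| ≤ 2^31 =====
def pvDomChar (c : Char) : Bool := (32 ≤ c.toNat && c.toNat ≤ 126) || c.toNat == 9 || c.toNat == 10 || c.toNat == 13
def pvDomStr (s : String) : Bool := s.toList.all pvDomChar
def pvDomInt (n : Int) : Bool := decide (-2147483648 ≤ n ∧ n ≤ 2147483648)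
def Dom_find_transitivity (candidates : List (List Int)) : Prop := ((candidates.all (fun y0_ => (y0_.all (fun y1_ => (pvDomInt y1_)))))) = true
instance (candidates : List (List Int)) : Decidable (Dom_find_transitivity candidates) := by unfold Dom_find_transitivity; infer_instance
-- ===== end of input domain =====

-- B replaces A's nested rescans by one dict-building pass (first two indices per first element,
-- skipping empty candidates, which cannot participate) plus one lookup pass; it returns A's exact
-- value wherever A returns one, and the equivalence is proved on lists of nonempty candidates.

-- ===== PORT A =====
-- inner 'for j, candidate in enumerate(candidates)' loop; none = IndexError on candidate[0]
def ftInnerA (i : Nat) (lastv : Int) : Nat → List (List Int) → Option Nat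
  | _, [] => none
  | j, c :: rest =>
    if j = i then ftInnerA i lastv (j + 1) rest
    else
      match PySem.List.pyGet? c 0 with
      | none => none
      | some h => if h = lastv then some j else ftInnerA i lastv (j + 1) rest

-- outer 'for i, source in enumerate(candidates)' loop; none result of pyGet? = IndexError on source[-1]
def ftOuterA : Nat → List (List Int) → List (List Int) → Option (Int × Int)
  | _, [], _ => none
  | i, src :: rest, all =>
    match PySem.List.pyGet? src (-1) with
    | none => none
    | some lastv =>
      match ftInnerA i lastv 0 all with
      | some j => some ((i : Int), (j : Int))
      | none => ftOuterA (i + 1) rest all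

def find_transitivity (candidates : List (List Int)) : Option (Int × Int) :=
  ftOuterA 0 candidates candidates

-- ===== PORT B =====
-- first pass: firsts[v] = first two indices j with candidates[j][0] == v;
-- 'if not cand: continue' = the pyGet? c 0 = none branch (cand[0] exists iff cand is nonempty)
def ftBuild : Nat → List (List Int) → PySem.Dict Int (Nat × Option Nat) → PySem.Dict Int (Nat × Option Nat)
  | _, [], d => d
  | j, c :: rest, d =>
    match PySem.List.pyGet? c 0 with
    | none => ftBuild (j + 1) rest d   -- 'if not cand: continue'
    | some v =>
      match d.get? v with
      | none => ftBuild (j + 1) rest (d.insert v (j, none))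
      | some (a, none) => ftBuild (j + 1) rest (d.insert v (a, some j))
      | some (_, some _) => ftBuild (j + 1) rest d

-- second pass: first i whose last element starts some other candidate;
-- 'if not source: continue' = the pyGet? src (-1) = none branch (source[-1] exists iff source is nonempty)
def ftScanB (d : PySem.Dict Int (Nat × Option Nat)) : Nat → List (List Int) → Option (Int × Int)
  | _, [] => none
  | i, src :: rest =>
    match PySem.List.pyGet? src (-1) with
    | none => ftScanB d (i + 1) rest   -- 'if not source: continue'
    | some lastv =>
      match d.get? lastv with
      | none => ftScanB d (i + 1) rest
      | some (a, b) =>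
        if a ≠ i then some ((i : Int), (a : Int))
        else
          match b with
          | some j => some ((i : Int), (j : Int))
          | none => ftScanB d (i + 1) rest

def find_transitivity_alt (candidates : List (List Int)) : Option (Int × Int) :=
  ftScanB (ftBuild 0 candidates PySem.Dict.empty) 0 candidates

-- ===== PRECONDITION & SPEC =====
-- Pre_ excludes inputs containing an empty candidate: on those A usually raises IndexError on
-- source[-1]/candidate[0]; on the few such inputs where A still returns (a pair found before the
-- empty candidate is consulted, or a list of fewer than two candidates) B returns the very same
-- value (see the cites), only the proof is restricted to the crash-free domain.
def Pre_find_transitivity (candidates : List (List Int)) : Prop :=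
  ∀ c ∈ candidates, c ≠ []
instance (candidates : List (List Int)) : Decidable (Pre_find_transitivity candidates) := by
  unfold Pre_find_transitivity; infer_instance

def pvWitness_find_transitivity : List (List Int) := [[1, 2], [3, 4], [2, 5]]

def Spec_find_transitivity (candidates : List (List Int)) (out : Option (Int × Int)) : Prop := out = find_transitivity_alt candidates
instance (candidates : List (List Int)) (out : Option (Int × Int)) : Decidable (Spec_find_transitivity candidates out) := by unfold Spec_find_transitivity; infer_instance

-- ===== CLAIM (what is proved, stated in full; the proofs are below) =====
def Claim_equal_find_transitivity : Prop := ∀ (candidates : List (List Int)), Dom_find_transitivity candidates → Pre_find_transitivity candidates → Spec_find_transitivity candidates (find_transitivity candidates)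

-- ===== LEMMAS AND PROOFS =====

-- indices j (counting from the start argument) with candidates[j][0] = v, in order
def ftOcc (v : Int) : Nat → List (List Int) → List Nat
  | _, [] => []
  | j, c :: rest =>
    if PySem.List.pyGet? c 0 = some v then j :: ftOcc v (j + 1) rest
    else ftOcc v (j + 1) rest

-- the first two elements of a list, in the shape the dict stores
def ftFirst2 : List Nat → Option (Nat × Option Nat)
  | [] => none
  | [a] => some (a, none)
  | a :: b :: _ => some (a, some b)

-- how one build pass extends an existing entry by further occurrences
def ftExtend (p : Option (Nat × Option Nat)) (l : List Nat) : Option (Nat × Option Nat) :=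
  match p with
  | some (a, some b) => some (a, some b)
  | some (a, none) =>
    match l.head? with
    | none => some (a, none)
    | some b => some (a, some b)
  | none => ftFirst2 l

-- what B's scan pass derives from a dict entry
def ftPick (p : Option (Nat × Option Nat)) (i : Nat) : Option Nat :=
  match p with
  | none => none
  | some (a, b) => if a ≠ i then some a else b

theorem ftOcc_ge (v : Int) (rest : List (List Int)) : ∀ j, ∀ x ∈ ftOcc v j rest, j ≤ x := by
  induction rest with
  | nil => intro j x hx; simp [ftOcc] at hx
  | cons c rest ih =>
    intro j x hx
    by_cases h : PySem.List.pyGet? c 0 = some v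
    · simp [ftOcc, h] at hx
      rcases hx with rfl | hx
      · omega
      · have := ih (j + 1) x hx; omega
    · simp [ftOcc, h] at hx
      have := ih (j + 1) x hx; omega

theorem ftInnerA_eq_filter (i : Nat) (v : Int) (rest : List (List Int))
    (hne : ∀ c ∈ rest, c ≠ []) :
    ∀ j, ftInnerA i v j rest = ((ftOcc v j rest).filter (fun x => x ≠ i)).head? := by
  induction rest with
  | nil => intro j; simp [ftInnerA, ftOcc]
  | cons c rest ih =>
    intro j
    have hc : c ≠ [] := hne c (by simp)
    have hrest : ∀ c' ∈ rest, c' ≠ [] := fun c' h => hne c' (by simp [h])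
    obtain ⟨h0, t0, rfl⟩ := List.exists_cons_of_ne_nil hc
    by_cases hji : j = i
    · subst hji
      by_cases hv : h0 = v
      · simp [ftInnerA, ftOcc, PySem.List.pyGet?_zero_cons, hv, ih hrest]
      · simp [ftInnerA, ftOcc, PySem.List.pyGet?_zero_cons, hv, ih hrest]
    · by_cases hv : h0 = v
      · simp [ftInnerA, ftOcc, PySem.List.pyGet?_zero_cons, hv, hji]
      · simp [ftInnerA, ftOcc, hv, hji, ih hrest]

theorem ftBuild_get? (v : Int) (rest : List (List Int)) :
    ∀ j d, (ftBuild j rest d).get? v = ftExtend (d.get? v) (ftOcc v j rest) := by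
  induction rest with
  | nil =>
    intro j d
    simp [ftBuild, ftOcc, ftExtend]
    cases h : d.get? v with
    | none => rfl
    | some p => rcases p with ⟨a, b⟩; cases b <;> rfl
  | cons c rest ih =>
    intro j d
    cases hg : PySem.List.pyGet? c 0 with
    | none =>
      have hocc : ftOcc v j (c :: rest) = ftOcc v (j + 1) rest := by
        simp [ftOcc, hg]
      simp [ftBuild, hg, hocc, ih]
    | some w =>
      by_cases hv : w = v
      · subst hv
        have hocc : ftOcc w j (c :: rest) = j :: ftOcc w (j + 1) rest := by
          simp [ftOcc, hg]
        rw [hocc]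
        cases hd : d.get? w with
        | none =>
          simp only [ftBuild, hg, hd]
          rw [ih]
          rw [PySem.Dict.get?_insert_self]
          simp only [ftExtend, ftFirst2]
          cases ftOcc w (j + 1) rest <;> rfl
        | some p =>
          rcases p with ⟨a, b⟩
          cases b with
          | none =>
            simp only [ftBuild, hg, hd]
            rw [ih]
            rw [PySem.Dict.get?_insert_self]
            simp only [ftExtend]
            cases ftOcc w (j + 1) rest <;> rfl
          | some b0 =>
            simp only [ftBuild, hg, hd]
            rw [ih, hd]
            rfl
      · have hocc : ftOcc v j (c :: rest) = ftOcc v (j + 1) rest := by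
          simp [ftOcc, hg, hv]
        rw [hocc]
        cases hd : d.get? w with
        | none =>
          simp only [ftBuild, hg, hd]
          rw [ih]
          rw [PySem.Dict.get?_insert_of_ne _ _ (fun h => hv h.symm)]
        | some p =>
          rcases p with ⟨a, b⟩
          cases b with
          | none =>
            simp only [ftBuild, hg, hd]
            rw [ih]
            rw [PySem.Dict.get?_insert_of_ne _ _ (fun h => hv h.symm)]
          | some b0 =>
            simp only [ftBuild, hg, hd]
            rw [ih]

theorem ftPick_eq_filter (occ : List Nat) (i : Nat)
    (hsort : ∀ a b t, occ = a :: b :: t → a < b) :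
    (occ.filter (fun x => x ≠ i)).head? = ftPick (ftFirst2 occ) i := by
  match occ with
  | [] => rfl
  | [a] =>
    by_cases h : a = i <;> simp [ftFirst2, ftPick, h]
  | a :: b :: t =>
    have hab : a < b := hsort a b t rfl
    by_cases h : a = i
    · subst h
      have hb : b ≠ a := by omega
      simp [ftFirst2, ftPick, hb]
    · simp [ftFirst2, ftPick, h]

theorem ftOuterA_eq_ftScanB (all : List (List Int)) (hne : ∀ c ∈ all, c ≠ [])
    (rest : List (List Int)) (hrest : ∀ c ∈ rest, c ≠ []) :
    ∀ i, ftOuterA i rest all = ftScanB (ftBuild 0 all PySem.Dict.empty) i rest := by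
  induction rest with
  | nil => intro i; simp [ftOuterA, ftScanB]
  | cons src rest ih =>
    intro i
    have hsrc : src ≠ [] := hrest src (by simp)
    have hrest' : ∀ c ∈ rest, c ≠ [] := fun c h => hrest c (by simp [h])
    obtain ⟨lastv, hl⟩ : ∃ w, src.getLast? = some w := by
      cases h : src.getLast? with
      | none => exact absurd (List.getLast?_eq_none_iff.mp h) hsrc
      | some w => exact ⟨w, rfl⟩
    have hget : PySem.List.pyGet? src (-1) = some lastv := by
      rw [PySem.List.pyGet?_neg_one]; exact hl
    have hdict : (ftBuild 0 all PySem.Dict.empty).get? lastv = ftFirst2 (ftOcc lastv 0 all) := by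
      rw [ftBuild_get? lastv all 0 PySem.Dict.empty, PySem.Dict.get?_empty]
      rfl
    have hinner : ftInnerA i lastv 0 all = ftPick (ftFirst2 (ftOcc lastv 0 all)) i := by
      rw [ftInnerA_eq_filter i lastv all hne 0]
      apply ftPick_eq_filter
      intro a b t h
      have hb : b ∈ ftOcc lastv 0 all := by rw [h]; simp
      have hge := ftOcc_ge lastv all 0
      -- b occurs in the tail starting at a + 1
      have : ∀ (l : List (List Int)) (j : Nat) (a b : Nat) (t : List Nat),
          ftOcc lastv j l = a :: b :: t → a < b := by
        intro l
        induction l with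
        | nil => intro j a b t h; simp [ftOcc] at h
        | cons c cs ihl =>
          intro j a b t h
          by_cases hc : PySem.List.pyGet? c 0 = some lastv
          · simp only [ftOcc, if_pos hc] at h
            injection h with h1 h2
            subst h1
            have hb' : b ∈ ftOcc lastv (j + 1) cs := by rw [h2]; simp
            have := ftOcc_ge lastv cs (j + 1) b hb'
            omega
          · simp only [ftOcc, if_neg hc] at h
            exact ihl (j + 1) a b t h
      exact this all 0 a b t h
    simp only [ftOuterA, ftScanB, hget, hdict, hinner, ftPick]
    cases hocc : ftFirst2 (ftOcc lastv 0 all) with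
    | none => simpa using ih hrest' (i + 1)
    | some p =>
      rcases p with ⟨a, b⟩
      by_cases hai : a = i
      · rw [hai]
        cases b with
        | none => simpa using ih hrest' (i + 1)
        | some j => simp
      · simp [hai]

-- ===== VERDICT (by name: the statement is the Claim_ definition above) =====
theorem find_transitivity_spec : Claim_equal_find_transitivity := by
  intro candidates _ hpre
  unfold Spec_find_transitivity find_transitivity find_transitivity_alt
  exact ftOuterA_eq_ftScanB candidates hpre candidates hpre 0
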